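-- pv_equiv track=rewrite | github.com/Shen-M0/OS_Page_Replacement_Algorithm | app.py | run_lfu
-- ===== SOURCE A (Python) =====
-- from collections import deque, defaultdict
--
-- def run_lfu(ref_string, frame_size):
--     memory = []
--     frequency = defaultdict(int)
--     page_faults = 0
--     for page in ref_string:
--         frequency[page] += 1
--         if page not in memory:
--             page_faults += 1
--             if len(memory) < frame_size:
--                 memory.append(page)
--             else:
--                 min_freq = float('inf')
--                 victim = -1
--                 for p in memory:
--                     if frequency[p] < min_freq:
--                         min_freq = frequency[p]
--                         victim = p
--                 memory.remove(victim)
--                 memory.append(page)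
--     return page_faults
-- ===== SOURCE B (Python) =====
-- def _insort(q, e):
--     # insert e into ascending-sorted q by binary search (before the first entry not < e)
--     lo, hi = 0, len(q)
--     while lo < hi:
--         mid = (lo + hi) // 2
--         if q[mid] < e:
--             lo = mid + 1
--         else:
--             hi = mid
--     q.insert(lo, e)
--
-- def run_lfu(ref_string, frame_size):
--     # Resident frames are kept as a priority queue `queue` of (frequency, insertion_seq, page)
--     # entries maintained in ascending order, so eviction is popping the head: the resident page
--     # of minimal frequency, ties broken by earliest frame insertion (A's scan order).
--     freq = {}        # lifetime reference counts (they persist across evictions, as in A)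
--     resident = {}    # resident page -> its frame-insertion counter
--     queue = []       # sorted list of (freq[p], resident[p], p) for resident p
--     seq = 0
--     faults = 0
--     for page in ref_string:
--         f = freq.get(page, 0) + 1
--         freq[page] = f
--         if page in resident:
--             queue.remove((f - 1, resident[page], page))
--             _insort(queue, (f, resident[page], page))
--         else:
--             faults += 1
--             if len(queue) >= frame_size:
--                 _, _, victim = queue.pop(0)
--                 del resident[victim]
--             resident[page] = seq
--             _insort(queue, (f, seq, page))
--             seq += 1
--     return faults
-- ===== Notes on version B (the rewrite author's own statement) =====
-- stated objective: faster
-- what changed: B keeps the resident frames as a priority queue: an ascending-sorted list of (frequency, insertion-counter, page) triples maintained by binary-search insertion, so membership is a dict lookup and the eviction victim is simply the head of the queue, replacing A's unordered frame list with a Python-level membership scan per reference and a hand-written min-frequency scan per eviction.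
-- outside the precondition, e.g. on run_lfu([1, 2], 0): A raises ValueError, B raises IndexError
import Mathlib
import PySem

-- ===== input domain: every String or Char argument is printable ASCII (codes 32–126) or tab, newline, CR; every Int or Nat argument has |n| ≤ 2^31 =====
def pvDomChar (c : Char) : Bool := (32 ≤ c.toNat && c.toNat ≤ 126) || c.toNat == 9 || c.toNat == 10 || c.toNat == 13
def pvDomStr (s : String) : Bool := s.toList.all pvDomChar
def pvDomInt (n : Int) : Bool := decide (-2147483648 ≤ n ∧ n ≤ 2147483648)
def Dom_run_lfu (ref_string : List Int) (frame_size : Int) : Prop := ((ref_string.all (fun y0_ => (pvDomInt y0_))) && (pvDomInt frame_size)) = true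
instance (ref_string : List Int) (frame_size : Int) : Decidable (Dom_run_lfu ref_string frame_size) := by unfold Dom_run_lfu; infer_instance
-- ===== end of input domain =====

-- B replaces A's unordered frame list (membership scan per reference, min-frequency scan per
-- eviction) by a priority queue: the resident frames are kept as a list of (frequency,
-- insertion-counter, page) triples maintained in ascending order by binary-search insertion,
-- so the eviction victim is simply the head of the queue (measured faster in a timing run).

-- ===== PORT A =====

-- victim scan: `min_freq = float('inf')` is modeled as `none` in the first component
def lfuScanA (frequency : PySem.Dict Int Int) (mv : Option Int × Int) (p : Int) : Option Int × Int :=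
  match mv.1 with
  | none => (some (frequency.getD p 0), p)
  | some m => if frequency.getD p 0 < m then (some (frequency.getD p 0), p) else mv

-- loop body of A's `for page in ref_string`; state = (memory, frequency, page_faults)
def lfuStepA (frame_size : Int) (st : List Int × PySem.Dict Int Int × Int) (page : Int) :
    List Int × PySem.Dict Int Int × Int :=
  let memory := st.1
  let frequency := st.2.1.modify page 0 (· + 1)
  if page ∈ memory then (memory, frequency, st.2.2)
  else
    let page_faults := st.2.2 + 1
    if PySem.List.len memory < frame_size then (memory ++ [page], frequency, page_faults)
    else
      let mv := memory.foldl (lfuScanA frequency) (none, -1)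
      -- `memory.remove(victim)`: raises (none) only when memory = [], which Pre_ excludes
      (((PySem.List.remove? memory mv.2).getD memory) ++ [page], frequency, page_faults)

def run_lfu (ref_string : List Int) (frame_size : Int) : Int :=
  (ref_string.foldl (lfuStepA frame_size) ([], PySem.Dict.empty, 0)).2.2

-- ===== PORT B =====

-- Python tuple '<' on the (freq, seq, page) triples: lexicographic
def tupLt (a b : Int × Int × Int) : Bool :=
  decide (a.1 < b.1 ∨ (a.1 = b.1 ∧ (a.2.1 < b.2.1 ∨ (a.2.1 = b.2.1 ∧ a.2.2 < b.2.2))))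

-- Source B's _insort binary-search loop `while lo < hi: mid = (lo+hi)//2; ...`
-- q[mid] is always in range here (0 ≤ lo ≤ mid < hi ≤ len q), so pyGetD is exact
def bsLoop (q : List (Int × Int × Int)) (e : Int × Int × Int) (lo hi : Int) : Int :=
  if h : lo < hi then
    let mid := PySem.Int.floordiv (lo + hi) 2
    if tupLt (PySem.List.pyGetD q mid (0, 0, 0)) e then bsLoop q e (mid + 1) hi
    else bsLoop q e lo mid
  else lo
termination_by (hi - lo).toNat
decreasing_by
  · have h1 : lo ≤ PySem.Int.floordiv (lo + hi) 2 :=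
      (PySem.Int.le_floordiv_iff_mul_le (by omega)).mpr (by omega)
    omega
  · have h2 : PySem.Int.floordiv (lo + hi) 2 < hi :=
      (PySem.Int.floordiv_lt_iff_lt_mul (by omega)).mpr (by omega)
    omega

-- Source B's _insort: binary-search position, then q.insert(lo, e)
def insortB (q : List (Int × Int × Int)) (e : Int × Int × Int) : List (Int × Int × Int) :=
  PySem.List.insert q (bsLoop q e 0 (PySem.List.len q)) e

-- loop body of B's `for page in ref_string`; state = (freq, resident, queue, seq, faults)
def lfuStepB (frame_size : Int)
    (st : PySem.Dict Int Int × PySem.Dict Int Int × List (Int × Int × Int) × Int × Int)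
    (page : Int) :
    PySem.Dict Int Int × PySem.Dict Int Int × List (Int × Int × Int) × Int × Int :=
  let f := st.1.getD page 0 + 1
  let freq := st.1.insert page f
  let resident := st.2.1
  let queue := st.2.2.1
  let seq := st.2.2.2.1
  let faults := st.2.2.2.2
  if resident.contains page then
    -- queue.remove(...): ValueError impossible, the current entry of a resident page is queued
    let q1 := (PySem.List.remove? queue (f - 1, resident.getD page 0, page)).getD queue
    (freq, resident, insortB q1 (f, resident.getD page 0, page), seq, faults)
  else
    if frame_size ≤ PySem.List.len queue then
      match queue with
      | [] =>  -- queue.pop(0) raises IndexError here (only when frame_size < 1, outside Pre_)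
        (freq, resident.insert page seq, insortB queue (f, seq, page), seq + 1, faults + 1)
      | v :: rest =>
        (freq, (resident.erase v.2.2).insert page seq, insortB rest (f, seq, page), seq + 1, faults + 1)
    else
      (freq, resident.insert page seq, insortB queue (f, seq, page), seq + 1, faults + 1)

def run_lfu_alt (ref_string : List Int) (frame_size : Int) : Int :=
  (ref_string.foldl (lfuStepB frame_size) (PySem.Dict.empty, PySem.Dict.empty, [], 0, 0)).2.2.2.2

-- ===== PRECONDITION & SPEC =====
-- A (and B) raise ValueError/IndexError when frame_size < 1 and ref_string is nonempty
-- (eviction from an empty frame set); Pre_ excludes exactly those inputs.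
def Pre_run_lfu (ref_string : List Int) (frame_size : Int) : Prop :=
  ref_string = [] ∨ 1 ≤ frame_size
instance (ref_string : List Int) (frame_size : Int) : Decidable (Pre_run_lfu ref_string frame_size) := by unfold Pre_run_lfu; infer_instance
def pvWitness_run_lfu : List Int × Int := ([1, 2, 3, 1, 2, 4, 1, 5], 3)

def Spec_run_lfu (ref_string : List Int) (frame_size : Int) (out : Int) : Prop := out = run_lfu_alt ref_string frame_size
instance (ref_string : List Int) (frame_size : Int) (out : Int) : Decidable (Spec_run_lfu ref_string frame_size out) := by unfold Spec_run_lfu; infer_instance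

-- ===== CLAIM (what is proved, stated in full; the proofs are below) =====
def Claim_equal_run_lfu : Prop := ∀ (ref_string : List Int) (frame_size : Int), Dom_run_lfu ref_string frame_size → Pre_run_lfu ref_string frame_size → Spec_run_lfu ref_string frame_size (run_lfu ref_string frame_size)

-- ===== LEMMAS AND PROOFS =====

theorem tupLt_trans {a b c : Int × Int × Int} (h1 : tupLt a b = true) (h2 : tupLt b c = true) :
    tupLt a c = true := by
  simp only [tupLt, decide_eq_true_eq] at *; omega

theorem tupLt_of_ne_of_not_lt {a b : Int × Int × Int} (h : b ≠ a) (h2 : tupLt a b = false) :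
    tupLt b a = true := by
  rcases a with ⟨a1, a2, a3⟩; rcases b with ⟨b1, b2, b3⟩
  simp only [tupLt, decide_eq_false_iff_not, decide_eq_true_eq, ne_eq, Prod.mk.injEq,
    not_and] at *
  by_cases e1 : b1 = a1 <;> by_cases e2 : b2 = a2 <;> simp_all <;> omega

-- proof-side helper: the linear characterization of sorted insertion
def insort (q : List (Int × Int × Int)) (e : Int × Int × Int) : List (Int × Int × Int) :=
  match q with
  | [] => [e]
  | x :: t => if tupLt x e then x :: insort t e else e :: x :: t

theorem insort_eq_take_drop (q : List (Int × Int × Int)) (e : Int × Int × Int) :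
    insort q e = q.take (q.takeWhile (fun x => tupLt x e)).length
      ++ e :: q.drop (q.takeWhile (fun x => tupLt x e)).length := by
  induction q with
  | nil => simp [insort]
  | cons x t ih =>
    by_cases h : tupLt x e = true
    · simp [insort, h, ih]
    · simp [insort, h]

theorem takeWhile_getElem_true (q : List (Int × Int × Int)) (P : Int × Int × Int → Bool) :
    ∀ i : Nat, (hi : i < q.length) → i < (q.takeWhile P).length → P q[i] = true := by
  induction q with
  | nil => intro i hi; simp at hi
  | cons x t ih =>
    intro i hi hlt
    by_cases hx : P x = true
    · rw [List.takeWhile_cons, if_pos hx] at hlt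
      match i with
      | 0 => simpa using hx
      | Nat.succ k =>
        have hk : k < t.length := by simpa using hi
        have := ih k hk (by simpa using hlt)
        simpa using this
    · rw [List.takeWhile_cons, if_neg hx] at hlt
      simp at hlt

theorem takeWhile_boundary_false (q : List (Int × Int × Int)) (P : Int × Int × Int → Bool)
    (h : (q.takeWhile P).length < q.length) :
    (hq : (q.takeWhile P).length < q.length) → P q[(q.takeWhile P).length] = false := by
  intro hq
  induction q with
  | nil => simp at h
  | cons x t ih =>
    by_cases hx : P x = true
    · simp only [List.takeWhile_cons, if_pos hx, List.length_cons] at hq ⊢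
      have ht : (t.takeWhile P).length < t.length := by simpa using hq
      simpa using ih (by simpa using ht) ht
    · simp only [List.takeWhile_cons, if_neg hx, List.length_nil] at hq ⊢
      simpa using hx

theorem bsLoop_eq_of_sorted (q : List (Int × Int × Int)) (e : Int × Int × Int)
    (hs : q.Pairwise (fun a b => tupLt a b = true)) :
    ∀ lo hi : Int, 0 ≤ lo → hi ≤ (q.length : Int) → lo ≤ hi →
      lo ≤ ((q.takeWhile (fun x => tupLt x e)).length : Int) →
      ((q.takeWhile (fun x => tupLt x e)).length : Int) ≤ hi →
      bsLoop q e lo hi = ((q.takeWhile (fun x => tupLt x e)).length : Int) := by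
  set jn := (q.takeWhile (fun x => tupLt x e)).length with hjn
  have F2 : ∀ i : Nat, (hi : i < q.length) → i < jn → tupLt q[i] e = true :=
    fun i hi hlt => takeWhile_getElem_true q _ i hi hlt
  have F1 : ∀ i : Nat, (hi : i < q.length) → jn ≤ i → tupLt q[i] e = false := by
    intro i hi hji
    rcases Nat.eq_or_lt_of_le hji with heq | hlt
    · subst heq
      exact takeWhile_boundary_false q _ hi hi
    · cases hcon : tupLt q[i] e with
      | false => rfl
      | true =>
        exfalso
        have hjl : jn < q.length := lt_trans hlt hi
        have hji2 : tupLt q[jn] q[i] = true :=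
          (List.pairwise_iff_getElem.mp hs) jn i hjl hi hlt
        have := tupLt_trans hji2 hcon
        rw [takeWhile_boundary_false q _ hjl hjl] at this
        exact Bool.false_ne_true this
  intro lo hi
  induction lo, hi using bsLoop.induct q e with
  | case1 lo hi hlh mid hP ih =>
    intro h0 hlen hlohi hloj hjhi
    have hmlo : lo ≤ mid := (PySem.Int.le_floordiv_iff_mul_le (by omega)).mpr (by omega)
    have hmhi : mid < hi := (PySem.Int.floordiv_lt_iff_lt_mul (by omega)).mpr (by omega)
    have hmrange : mid < (q.length : Int) := by omega
    have hget : PySem.List.pyGetD q mid (0, 0, 0) = q[mid.toNat] :=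
      PySem.List.pyGetD_eq_getElem q (0, 0, 0) (by omega) hmrange
    have hmj : mid + 1 ≤ (jn : Int) := by
      by_contra hcon
      have hjm : jn ≤ mid.toNat := by omega
      have := F1 mid.toNat (by omega) hjm
      rw [hget, this] at hP
      exact Bool.false_ne_true hP
    rw [bsLoop]
    simp only [dif_pos hlh]
    rw [if_pos hP]
    exact ih (by omega) hlen (by omega) hmj hjhi
  | case2 lo hi hlh mid hP ih =>
    intro h0 hlen hlohi hloj hjhi
    have hmlo : lo ≤ mid := (PySem.Int.le_floordiv_iff_mul_le (by omega)).mpr (by omega)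
    have hmhi : mid < hi := (PySem.Int.floordiv_lt_iff_lt_mul (by omega)).mpr (by omega)
    have hmrange : mid < (q.length : Int) := by omega
    have hget : PySem.List.pyGetD q mid (0, 0, 0) = q[mid.toNat] :=
      PySem.List.pyGetD_eq_getElem q (0, 0, 0) (by omega) hmrange
    have hjm : (jn : Int) ≤ mid := by
      by_contra hcon
      have hmjn : mid.toNat < jn := by omega
      have := F2 mid.toNat (by omega) hmjn
      rw [hget, this] at hP
      exact hP rfl
    rw [bsLoop]
    simp only [dif_pos hlh]
    rw [if_neg hP]
    exact ih h0 (by omega) (by omega) hloj hjm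
  | case3 lo hi hlh =>
    intro h0 hlen hlohi hloj hjhi
    rw [bsLoop]
    simp only [dif_neg hlh]
    omega

theorem insortB_eq_insort (q : List (Int × Int × Int)) (e : Int × Int × Int)
    (hs : q.Pairwise (fun a b => tupLt a b = true)) :
    insortB q e = insort q e := by
  have hle : (q.takeWhile (fun x => tupLt x e)).length ≤ q.length :=
    (List.takeWhile_sublist _).length_le
  unfold insortB
  rw [show PySem.List.len q = (q.length : Int) by simp [PySem.List.len]]
  rw [bsLoop_eq_of_sorted q e hs 0 (q.length : Int) (le_refl 0) (le_refl _)
      (by omega) (by omega) (by omega)]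
  rw [PySem.List.insert_natCast q _ e hle]
  exact (insort_eq_take_drop q e).symm

theorem insort_perm (l : List (Int × Int × Int)) (e : Int × Int × Int) :
    (insort l e).Perm (e :: l) := by
  induction l with
  | nil => simp [insort]
  | cons x t ih =>
    simp only [insort]
    split
    · exact (ih.cons x).trans (List.Perm.swap e x t)
    · exact List.Perm.refl _

theorem mem_insort {l : List (Int × Int × Int)} {e x : Int × Int × Int} :
    x ∈ insort l e ↔ x = e ∨ x ∈ l := by
  rw [(insort_perm l e).mem_iff]; simp

theorem insort_pairwise {l : List (Int × Int × Int)} {e : Int × Int × Int}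
    (hp : l.Pairwise (fun a b => tupLt a b = true)) (hne : ∀ x ∈ l, x ≠ e) :
    (insort l e).Pairwise (fun a b => tupLt a b = true) := by
  induction l with
  | nil => simp [insort]
  | cons x t ih =>
    rcases List.pairwise_cons.mp hp with ⟨hx, ht⟩
    simp only [insort]
    split
    · rename_i hlt
      refine List.pairwise_cons.mpr ⟨?_, ih ht (fun y hy => hne y (List.mem_cons_of_mem x hy))⟩
      intro y hy
      rcases mem_insort.mp hy with rfl | hy'
      · exact hlt
      · exact hx y hy'
    · rename_i hnlt
      have hex : tupLt e x = true :=
        tupLt_of_ne_of_not_lt (fun h => hne x (List.mem_cons_self) h.symm)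
          (Bool.not_eq_true _ ▸ hnlt)
      refine List.pairwise_cons.mpr ⟨?_, hp⟩
      intro y hy
      rcases List.mem_cons.mp hy with rfl | hy'
      · exact hex
      · exact tupLt_trans hex (hx y hy')

-- Dict.erase lemmas (not in the PySem book)
theorem find?_filter_ne {ν : Type} (t : List (Int × ν)) (k v : Int) (h : k ≠ v) :
    List.find? (fun p => p.1 == k) (t.filter (fun p => !p.1 == v))
      = List.find? (fun p => p.1 == k) t := by
  induction t with
  | nil => rfl
  | cons p t ih =>
    by_cases hp : p.1 = v
    · rw [List.filter_cons_of_neg (by simp [hp]),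
        List.find?_cons_of_neg (by simp [hp, Ne.symm h])]
      exact ih
    · rw [List.filter_cons_of_pos (by simp [hp])]
      by_cases hk : p.1 = k
      · rw [List.find?_cons_of_pos (by simp [hk]), List.find?_cons_of_pos (by simp [hk])]
      · rw [List.find?_cons_of_neg (by simp [hk]), List.find?_cons_of_neg (by simp [hk])]
        exact ih

theorem get?_erase_of_ne {ν : Type} (d : PySem.Dict Int ν) (k v : Int) (h : k ≠ v) :
    (d.erase v).get? k = d.get? k := by
  rcases d with ⟨items⟩
  simp only [PySem.Dict.erase, PySem.Dict.get?]
  rw [find?_filter_ne items k v h]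

theorem getD_erase_of_ne {ν : Type} (d : PySem.Dict Int ν) (k v : Int) (d0 : ν) (h : k ≠ v) :
    (d.erase v).getD k d0 = d.getD k d0 := by
  rw [PySem.Dict.getD_eq_get?_getD, PySem.Dict.getD_eq_get?_getD, get?_erase_of_ne d k v h]

theorem get?_erase_self {ν : Type} (d : PySem.Dict Int ν) (v : Int) :
    (d.erase v).get? v = none := by
  rcases d with ⟨items⟩
  simp only [PySem.Dict.erase, PySem.Dict.get?, Option.map_eq_none_iff]
  rw [List.find?_eq_none]
  intro x hx
  have := (List.mem_filter.mp hx).2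
  simp only [Bool.not_eq_eq_eq_not, Bool.not_true, beq_eq_false_iff_ne, ne_eq] at this
  simp [this]

theorem contains_erase {ν : Type} (d : PySem.Dict Int ν) (k v : Int) :
    (d.erase v).contains k = (decide (k ≠ v) && d.contains k) := by
  by_cases h : k = v
  · subst h
    rw [PySem.Dict.contains_eq_isSome_get?, get?_erase_self]
    simp
  · rw [PySem.Dict.contains_eq_isSome_get?, PySem.Dict.contains_eq_isSome_get?,
      get?_erase_of_ne d k v h]
    simp [h]

-- the coupling invariant between A's state (memory, freqA) and B's state
def LfuInv (memory : List Int) (freqA freqB resident : PySem.Dict Int Int)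
    (queue : List (Int × Int × Int)) (seq : Int) : Prop :=
  (∀ p, freqA.getD p 0 = freqB.getD p 0) ∧
  queue.Pairwise (fun a b => tupLt a b = true) ∧
  (queue.map (fun e => e.2.2)).Perm memory ∧
  (∀ e ∈ queue, e.1 = freqB.getD e.2.2 0 ∧ resident.getD e.2.2 0 = e.2.1 ∧ e.2.1 < seq) ∧
  memory.Pairwise (fun p q => resident.getD p 0 < resident.getD q 0) ∧
  (∀ p, resident.contains p = true ↔ p ∈ memory)

theorem scan_snd_eq (freq : PySem.Dict Int Int) (pre post : List Int) (v f0 : Int)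
    (hv : freq.getD v 0 = f0)
    (hpre : ∀ q ∈ pre, f0 < freq.getD q 0)
    (hpost : ∀ q ∈ post, f0 ≤ freq.getD q 0) :
    ((pre ++ v :: post).foldl (lfuScanA freq) (none, -1)).2 = v := by
  have L1 : ∀ (l : List Int) (acc : Option Int × Int),
      (acc.1 = none ∨ ∃ m, acc.1 = some m ∧ f0 < m) → (∀ q ∈ l, f0 < freq.getD q 0) →
      ((l.foldl (lfuScanA freq) acc).1 = none ∨
        ∃ m, (l.foldl (lfuScanA freq) acc).1 = some m ∧ f0 < m) := by
    intro l
    induction l with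
    | nil => intro acc h _; exact h
    | cons q t ih =>
      intro acc h hl
      simp only [List.foldl_cons]
      apply ih
      · rcases h with h0 | ⟨m, hm, hfm⟩
        · right
          exact ⟨freq.getD q 0, by simp [lfuScanA, h0], hl q List.mem_cons_self⟩
        · by_cases hq : freq.getD q 0 < m
          · right
            exact ⟨freq.getD q 0, by simp [lfuScanA, hm, hq], hl q List.mem_cons_self⟩
          · right
            exact ⟨m, by simp [lfuScanA, hm, hq], hfm⟩
      · exact fun q hq => hl q (List.mem_cons_of_mem _ hq)
  have L3 : ∀ (l : List Int), (∀ q ∈ l, f0 ≤ freq.getD q 0) →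
      l.foldl (lfuScanA freq) (some f0, v) = (some f0, v) := by
    intro l
    induction l with
    | nil => intro _; rfl
    | cons q t ih =>
      intro hl
      have : ¬ freq.getD q 0 < f0 := not_lt.mpr (hl q List.mem_cons_self)
      simp only [List.foldl_cons, lfuScanA, this, if_false]
      exact ih (fun q hq => hl q (List.mem_cons_of_mem _ hq))
  rw [List.foldl_append]
  have hacc := L1 pre (none, -1) (Or.inl rfl) hpre
  set acc := pre.foldl (lfuScanA freq) (none, -1) with hdef
  have hstep : lfuScanA freq acc v = (some f0, v) := by
    rcases hacc with h0 | ⟨m, hm, hfm⟩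
    · simp [lfuScanA, h0, hv]
    · simp [lfuScanA, hm, hv, hfm]
  rw [List.foldl_cons, hstep, L3 post hpost]

-- map-nodup gives injectivity of the page projection on queue members
theorem page_inj {queue : List (Int × Int × Int)}
    (hnd : (queue.map (fun e => e.2.2)).Nodup)
    {e e' : Int × Int × Int} (he : e ∈ queue) (he' : e' ∈ queue) (h : e.2.2 = e'.2.2) :
    e = e' := List.inj_on_of_nodup_map hnd he he' h

-- the main simulation lemma
theorem loop_eq (frame_size : Int) (hfs : 1 ≤ frame_size) (l : List Int) :
    ∀ (memory : List Int) (freqA freqB resident : PySem.Dict Int Int)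
      (queue : List (Int × Int × Int)) (seq c : Int),
      LfuInv memory freqA freqB resident queue seq →
      (l.foldl (lfuStepA frame_size) (memory, freqA, c)).2.2
        = (l.foldl (lfuStepB frame_size) (freqB, resident, queue, seq, c)).2.2.2.2 := by
  induction l with
  | nil => intro memory freqA freqB resident queue seq c _; rfl
  | cons page t ih =>
    intro memory freqA freqB resident queue seq c hinv
    obtain ⟨hfr, hsort, hperm, hent, hmem, hres⟩ := hinv
    set f : Int := freqB.getD page 0 + 1 with hfdef
    set freqA' := freqA.modify page 0 (· + 1) with hfadef
    set freqB' := freqB.insert page f with hfbdef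
    have hfr' : ∀ p, freqA'.getD p 0 = freqB'.getD p 0 := by
      intro p
      rw [hfadef, hfbdef, PySem.Dict.getD_modify, PySem.Dict.getD_insert]
      split_ifs with hp
      · subst hp; rw [hfr p]
      · exact hfr p
    have hnd : memory.Nodup := hmem.imp (fun h hab => absurd (hab ▸ h) (lt_irrefl _))
    have hndq : (queue.map (fun e => e.2.2)).Nodup := hperm.nodup_iff.mpr hnd
    have hqnd : queue.Nodup := List.Nodup.of_map _ hndq
    have hpagemem : ∀ e ∈ queue, e.2.2 ∈ memory := by
      intro e he
      exact hperm.mem_iff.mp (List.mem_map_of_mem he)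
    have hqofmem : ∀ q ∈ memory, ∃ e ∈ queue, e.2.2 = q := by
      intro q hq
      have : q ∈ queue.map (fun e => e.2.2) := hperm.mem_iff.mpr hq
      simpa using this
    have hseqlt : ∀ q ∈ memory, resident.getD q 0 < seq := by
      intro q hq
      obtain ⟨e, he, hep⟩ := hqofmem q hq
      obtain ⟨_, h2, h3⟩ := hent e he
      rw [← hep, h2]; exact h3
    rw [List.foldl_cons, List.foldl_cons]
    by_cases hpage : page ∈ memory
    · -- HIT: page resident in both
      have hc : resident.contains page = true := (hres page).mpr hpage
      obtain ⟨e0, he0q, he0p⟩ := hqofmem page hpage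
      obtain ⟨hef, hes, hseq0⟩ := hent e0 he0q
      have he0 : e0 = (f - 1, resident.getD page 0, page) := by
        simp only [Prod.ext_iff]
        refine ⟨by rw [hef, he0p]; omega, by rw [← he0p]; exact hes.symm, he0p⟩
      have hrem : PySem.List.remove? queue (f - 1, resident.getD page 0, page)
          = some (queue.erase e0) := by
        rw [← he0]; exact PySem.List.remove?_eq_some_erase queue e0 he0q
      have hA : lfuStepA frame_size (memory, freqA, c) page = (memory, freqA', c) := by
        simp [lfuStepA, hpage, hfadef]
      have hB : lfuStepB frame_size (freqB, resident, queue, seq, c) page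
          = (freqB', resident, insortB (queue.erase e0) (f, resident.getD page 0, page), seq, c) := by
        simp only [lfuStepB, hc, if_true, hrem, ← hfdef, ← hfbdef, Option.getD_some]
      rw [hA, hB,
        insortB_eq_insort _ _ (hsort.sublist (List.erase_sublist ..))]
      apply ih
      have hepage : ∀ e ∈ queue.erase e0, e.2.2 ≠ page := by
        intro e he hpe
        have hee : e ∈ queue := List.mem_of_mem_erase he
        have heq : e = e0 := page_inj hndq hee he0q (by rw [hpe, he0p])
        exact (hqnd.mem_erase_iff.mp (heq ▸ he)).1 rfl
      refine ⟨hfr', ?_, ?_, ?_, hmem, hres⟩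
      · refine insort_pairwise (hsort.sublist (List.erase_sublist ..)) ?_
        intro x hx hxe
        exact hepage x hx (by rw [hxe])
      · refine ((insort_perm _ _).map _).trans ?_
        have h1 := (List.perm_cons_erase he0q).map (fun e : Int × Int × Int => e.2.2)
        simp only [List.map_cons, he0p] at h1 ⊢
        exact (h1.symm).trans hperm
      · intro e he
        rcases mem_insort.mp he with rfl | he'
        · refine ⟨?_, ?_, ?_⟩
          · show f = freqB'.getD page 0
            rw [hfbdef, PySem.Dict.getD_insert]; simp
          · rfl
          · show resident.getD page 0 < seq
            have h : resident.getD page 0 = e0.2.1 := by rw [← he0p]; exact hes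
            rw [h]; exact hseq0
        · have hee : e ∈ queue := List.mem_of_mem_erase he'
          obtain ⟨h1, h2, h3⟩ := hent e hee
          have hne : e.2.2 ≠ page := hepage e he'
          refine ⟨?_, h2, h3⟩
          rw [h1, hfbdef, PySem.Dict.getD_insert, if_neg hne]
    · -- MISS: page faults in both
      have hc : resident.contains page = false := by
        cases hcv : resident.contains page
        · rfl
        · exact absurd ((hres page).mp hcv) hpage
      have hlenq : queue.length = memory.length := by
        have := hperm.length_eq; simpa using this
      have hfr'' : ∀ q ∈ memory, freqA'.getD q 0 = freqB.getD q 0 := by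
        intro q hq
        have hqp : q ≠ page := fun h => hpage (h ▸ hq)
        rw [hfr' q, hfbdef, PySem.Dict.getD_insert, if_neg hqp]
      by_cases hroom : PySem.List.len memory < frame_size
      · -- room left: both append
        have hroomB : ¬ frame_size ≤ PySem.List.len queue := by
          simp only [PySem.List.len] at hroom ⊢
          omega
        have hroom' : (memory.length : Int) < frame_size := by
          simpa [PySem.List.len] using hroom
        have hA : lfuStepA frame_size (memory, freqA, c) page
            = (memory ++ [page], freqA', c + 1) := by
          simp [lfuStepA, hpage, hroom', hfadef]
        have hB : lfuStepB frame_size (freqB, resident, queue, seq, c) page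
            = (freqB', resident.insert page seq, insortB queue (f, seq, page), seq + 1, c + 1) := by
          simp only [lfuStepB, hc, Bool.false_eq_true, if_false, hroomB, ← hfdef, ← hfbdef]
        rw [hA, hB, insortB_eq_insort _ _ hsort]
        apply ih
        have hqne : ∀ x ∈ queue, x.2.2 ≠ page := fun x hx h => hpage (h ▸ hpagemem x hx)
        refine ⟨hfr', ?_, ?_, ?_, ?_, ?_⟩
        · exact insort_pairwise hsort (fun x hx hxe => hqne x hx (by rw [hxe]))
        · refine ((insort_perm _ _).map _).trans ?_
          simp only [List.map_cons]
          exact ((hperm.cons page).trans (List.perm_append_singleton page memory).symm)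
        · intro e he
          rcases mem_insort.mp he with rfl | he'
          · exact ⟨by rw [hfbdef, PySem.Dict.getD_insert]; simp,
              by rw [PySem.Dict.getD_insert]; simp, by show seq < seq + 1; omega⟩
          · obtain ⟨h1, h2, h3⟩ := hent e he'
            have hne : e.2.2 ≠ page := hqne e he'
            exact ⟨by rw [h1, hfbdef, PySem.Dict.getD_insert, if_neg hne],
              by rw [PySem.Dict.getD_insert, if_neg hne]; exact h2, by omega⟩
        · rw [List.pairwise_append]
          refine ⟨?_, List.pairwise_singleton _ _, ?_⟩
          · refine hmem.imp_of_mem ?_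
            intro a b ha hb hab
            have hap : a ≠ page := fun h => hpage (h ▸ ha)
            have hbp : b ≠ page := fun h => hpage (h ▸ hb)
            rw [PySem.Dict.getD_insert, if_neg hap, PySem.Dict.getD_insert, if_neg hbp]
            exact hab
          · intro a ha b hb
            rw [List.mem_singleton] at hb
            have hap : a ≠ page := fun h => hpage (h ▸ ha)
            rw [hb, PySem.Dict.getD_insert, if_neg hap, PySem.Dict.getD_insert, if_pos rfl]
            exact hseqlt a ha
        · intro p
          rw [PySem.Dict.contains_insert, List.mem_append, List.mem_singleton]
          by_cases hp : p = page
          · subst hp; simp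
          · simp only [Bool.or_eq_true, beq_iff_eq, hp, false_or, hres p, or_false]
      · -- EVICTION
        have hgeB : frame_size ≤ PySem.List.len queue := by
          simp only [PySem.List.len] at hroom ⊢
          omega
        cases queue with
        | nil =>
          exfalso
          simp only [PySem.List.len, List.length_nil, Nat.cast_zero] at hgeB
          omega
        | cons e0 rest =>
        obtain ⟨hef0, hes0, hseq0⟩ := hent e0 List.mem_cons_self
        have hv : e0.2.2 ∈ memory := hpagemem e0 List.mem_cons_self
        obtain ⟨pre, post, hsplit⟩ := List.append_of_mem hv
        have hndsplit := hsplit ▸ hnd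
        have hvpre : e0.2.2 ∉ pre := by
          intro h
          exact (List.nodup_append.mp hndsplit).2.2 _ h _ List.mem_cons_self rfl
        have hvpost : e0.2.2 ∉ post := by
          have := (List.nodup_append.mp hndsplit).2.1
          exact (List.nodup_cons.mp this).1
        have hcross : ∀ q ∈ pre, resident.getD q 0 < resident.getD e0.2.2 0 := by
          have := (List.pairwise_append.mp (hsplit ▸ hmem)).2.2
          exact fun q hq => this q hq e0.2.2 List.mem_cons_self
        have hcross2 : ∀ q ∈ post, resident.getD e0.2.2 0 < resident.getD q 0 := by
          have := List.pairwise_cons.mp (List.pairwise_append.mp (hsplit ▸ hmem)).2.1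
          exact fun q hq => this.1 q hq
        -- the head of the sorted queue is A's scan victim
        have hscan : ((pre ++ e0.2.2 :: post).foldl (lfuScanA freqA') (none, -1)).2 = e0.2.2 := by
          refine scan_snd_eq freqA' pre post e0.2.2 e0.1 ?_ ?_ ?_
          · rw [hfr'' e0.2.2 hv, hef0]
          · intro q hq
            have hqmem : q ∈ memory := hsplit ▸ (List.mem_append_left _ hq)
            obtain ⟨e, he, hep⟩ := hqofmem q hqmem
            have hne : e ≠ e0 := by
              intro h
              subst h
              exact absurd (hep ▸ hcross q hq) (lt_irrefl _)
            have herest : e ∈ rest := by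
              rcases List.mem_cons.mp he with h | h
              · exact absurd h hne
              · exact h
            have hlt : tupLt e0 e = true := (List.pairwise_cons.mp hsort).1 e herest
            obtain ⟨h1, h2, _⟩ := hent e he
            have hseqe : e.2.1 < e0.2.1 := by
              rw [← h2, hep, ← hes0]; exact hcross q hq
            rw [hfr'' q hqmem, ← hep, ← h1]
            simp only [tupLt, decide_eq_true_eq] at hlt
            omega
          · intro q hq
            have hqmem : q ∈ memory := hsplit ▸ (List.mem_append_right _ (List.mem_cons_of_mem _ hq))
            obtain ⟨e, he, hep⟩ := hqofmem q hqmem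
            have hne : e ≠ e0 := by
              intro h
              subst h
              exact absurd (hep ▸ hcross2 q hq) (lt_irrefl _)
            have herest : e ∈ rest := by
              rcases List.mem_cons.mp he with h | h
              · exact absurd h hne
              · exact h
            have hlt : tupLt e0 e = true := (List.pairwise_cons.mp hsort).1 e herest
            obtain ⟨h1, _, _⟩ := hent e he
            rw [hfr'' q hqmem, ← hep, ← h1]
            simp only [tupLt, decide_eq_true_eq] at hlt
            omega
        have herase : memory.erase e0.2.2 = pre ++ post := by
          rw [hsplit, List.erase_append_right _ hvpre, List.erase_cons_head]
        have hA : lfuStepA frame_size (memory, freqA, c) page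
            = (pre ++ post ++ [page], freqA', c + 1) := by
          simp only [lfuStepA, hfadef]
          rw [if_neg (by simpa using hpage), if_neg hroom]
          rw [show memory.foldl (lfuScanA (freqA.modify page 0 (· + 1))) (none, -1)
              = (pre ++ e0.2.2 :: post).foldl (lfuScanA freqA') (none, -1) by rw [← hsplit, hfadef]]
          rw [hscan, PySem.List.remove?_eq_some_erase memory e0.2.2 hv, Option.getD_some, herase]
        have hB : lfuStepB frame_size (freqB, resident, e0 :: rest, seq, c) page
            = (freqB', (resident.erase e0.2.2).insert page seq, insortB rest (f, seq, page),
               seq + 1, c + 1) := by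
          simp only [lfuStepB, hc, Bool.false_eq_true, if_false, hgeB, if_true, ← hfdef, ← hfbdef]
        rw [hA, hB, insortB_eq_insort _ _ (List.pairwise_cons.mp hsort).2]
        apply ih
        have hrestperm : List.Perm (rest.map (fun e => e.2.2)) (pre ++ post) := by
          have hmid : List.Perm memory (e0.2.2 :: (pre ++ post)) := by
            rw [hsplit]; exact List.perm_middle
          have h1 : List.Perm (e0.2.2 :: rest.map (fun e => e.2.2)) (e0.2.2 :: (pre ++ post)) := by
            simpa using hperm.trans hmid
          exact h1.cons_inv
        have hrestpages : ∀ e ∈ rest, e.2.2 ∈ pre ++ post := by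
          intro e he
          exact hrestperm.mem_iff.mp (List.mem_map_of_mem he)
        have hrne : ∀ e ∈ rest, e.2.2 ≠ page ∧ e.2.2 ≠ e0.2.2 := by
          intro e he
          have hm := hrestpages e he
          have hmm : e.2.2 ∈ memory := by
            rw [hsplit]
            rcases List.mem_append.mp hm with hh | hh
            · exact List.mem_append_left _ hh
            · exact List.mem_append_right _ (List.mem_cons_of_mem _ hh)
          refine ⟨fun h => hpage (h ▸ hmm), fun h => ?_⟩
          rcases List.mem_append.mp hm with hh | hh
          · exact hvpre (h ▸ hh)
          · exact hvpost (h ▸ hh)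
        set res' := (resident.erase e0.2.2).insert page seq with hres'def
        have hgd : ∀ q, q ≠ page → q ≠ e0.2.2 → res'.getD q 0 = resident.getD q 0 := by
          intro q h1 h2
          rw [hres'def, PySem.Dict.getD_insert, if_neg h1, getD_erase_of_ne _ _ _ _ h2]
        have hgdpage : res'.getD page 0 = seq := by
          rw [hres'def, PySem.Dict.getD_insert, if_pos rfl]
        have hsub : (pre ++ post).Sublist memory := by
          rw [hsplit]
          exact List.Sublist.append_left (List.sublist_cons_self _ _) pre
        have hppne : ∀ a ∈ pre ++ post, a ≠ page ∧ a ≠ e0.2.2 := by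
          intro a ha
          refine ⟨fun h => hpage (h ▸ hsub.subset ha), fun h => ?_⟩
          rcases List.mem_append.mp ha with hh | hh
          · exact hvpre (h ▸ hh)
          · exact hvpost (h ▸ hh)
        refine ⟨hfr', ?_, ?_, ?_, ?_, ?_⟩
        · refine insort_pairwise (List.pairwise_cons.mp hsort).2 ?_
          intro x hx hxe
          exact (hrne x hx).1 (by rw [hxe])
        · refine ((insort_perm _ _).map _).trans ?_
          simp only [List.map_cons]
          exact (hrestperm.cons page).trans (List.perm_append_singleton page (pre ++ post)).symm
        · intro e he
          rcases mem_insort.mp he with rfl | he'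
          · exact ⟨by rw [hfbdef, PySem.Dict.getD_insert]; simp,
              by show res'.getD page 0 = seq; exact hgdpage, by show seq < seq + 1; omega⟩
          · obtain ⟨h1, h2, h3⟩ := hent e (List.mem_cons_of_mem _ he')
            obtain ⟨hne1, hne2⟩ := hrne e he'
            exact ⟨by rw [h1, hfbdef, PySem.Dict.getD_insert, if_neg hne1],
              by rw [hgd e.2.2 hne1 hne2]; exact h2, by omega⟩
        · rw [List.pairwise_append]
          refine ⟨?_, List.pairwise_singleton _ _, ?_⟩
          · refine (hmem.sublist hsub).imp_of_mem ?_
            intro a b ha hb hab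
            obtain ⟨ha1, ha2⟩ := hppne a ha
            obtain ⟨hb1, hb2⟩ := hppne b hb
            rw [hgd a ha1 ha2, hgd b hb1 hb2]
            exact hab
          · intro a ha b hb
            rw [List.mem_singleton] at hb
            obtain ⟨ha1, ha2⟩ := hppne a ha
            rw [hb, hgdpage, hgd a ha1 ha2]
            exact hseqlt a (hsub.subset ha)
        · intro p
          by_cases hp : p = page
          · rw [hres'def, PySem.Dict.contains_insert]
            simp [hp, List.mem_append]
          · have hcc : res'.contains p = (decide ¬(p = e0.2.2) && resident.contains p) := by
              rw [hres'def, PySem.Dict.contains_insert, contains_erase]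
              simp [hp]
            rw [hcc]
            by_cases hpv : p = e0.2.2
            · have hf : (decide ¬(p = e0.2.2) && resident.contains p) = false := by
                simp [hpv]
              rw [hf]
              simp only [Bool.false_eq_true, false_iff]
              intro hmm
              rw [hpv] at hmm
              rcases List.mem_append.mp hmm with hh | hh
              · rcases List.mem_append.mp hh with h1 | h1
                · exact hvpre h1
                · exact hvpost h1
              · exact hp (hpv.trans (List.mem_singleton.mp hh))
            · have ht : (decide ¬(p = e0.2.2) && resident.contains p) = resident.contains p := by
                simp [hpv]
              rw [ht, hres p, hsplit]
              simp only [List.mem_append, List.mem_cons]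
              tauto
-- ===== VERDICT (by name: the statement is the Claim_ definition above) =====
theorem run_lfu_spec : Claim_equal_run_lfu := by
  intro ref_string frame_size _ hpre
  unfold Spec_run_lfu
  rcases hpre with h0 | hfs
  · subst h0; rfl
  · refine loop_eq frame_size hfs ref_string [] PySem.Dict.empty PySem.Dict.empty PySem.Dict.empty [] 0 0 ?_
    refine ⟨fun p => rfl, List.Pairwise.nil, List.Perm.refl _, fun e he => absurd he (List.not_mem_nil), List.Pairwise.nil, fun p => ?_⟩
    simp [PySem.Dict.contains_empty]
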